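-- pv_equiv track=rewrite | github.com/WhaleKlng/Python-Automatic | 视频拼接无损/5.11（生成器）.py | group_same
-- ===== SOURCE A (Python) =====
-- from collections import Counter
--
-- def group_same(tuple): #不含有同人片段则返回1
--     group=[]
--     for tul in tuple:
--         group.append(tul[:-1])
--     flag=1
--     result_dict=dict(Counter(group))
--     for key in result_dict:
--         if result_dict[key]>1:
--             flag=0
--     return flag
-- ===== SOURCE B (Python) =====
-- def group_same(tuple):  # 1 iff no prefix tul[:-1] occurs twice
--     seen = set()
--     for tul in tuple:
--         p = tul[:-1]
--         if p in seen:
--             return 0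
--         seen.add(p)
--     return 1
-- ===== Notes on version B (the rewrite author's own statement) =====
-- stated objective: simpler
-- what changed: Replaces the two-phase build-list-then-Counter-then-scan-counts structure with a single pass that keeps a set of seen prefixes and returns 0 at the first repeat.
import Mathlib
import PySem

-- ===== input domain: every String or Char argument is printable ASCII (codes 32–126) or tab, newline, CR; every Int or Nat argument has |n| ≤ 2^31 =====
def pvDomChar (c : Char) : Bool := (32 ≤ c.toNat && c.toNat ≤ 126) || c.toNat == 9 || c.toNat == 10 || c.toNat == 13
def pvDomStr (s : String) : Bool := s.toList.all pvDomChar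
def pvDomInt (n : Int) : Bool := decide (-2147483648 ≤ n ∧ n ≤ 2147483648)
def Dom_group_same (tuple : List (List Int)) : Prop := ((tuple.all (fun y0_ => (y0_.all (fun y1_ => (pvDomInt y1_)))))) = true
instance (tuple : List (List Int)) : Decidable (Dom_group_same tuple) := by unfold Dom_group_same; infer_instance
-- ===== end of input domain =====

-- B replaces A's build-prefix-list / Counter / scan-counts phases with one early-exiting pass over the tuples keeping a set of seen prefixes (simpler; same value everywhere).


-- ===== PORT A =====
def group_same (tuple : List (List Int)) : Int :=
  -- group=[]; for tul in tuple: group.append(tul[:-1])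
  let group : List (List Int) :=
    tuple.foldl (fun g tul => g ++ [PySem.List.slice tul none (some (-1))]) []
  -- flag=1
  let flag : Int := 1
  -- result_dict=dict(Counter(group))
  let result_dict := PySem.Dict.counter group
  -- for key in result_dict: if result_dict[key]>1: flag=0
  result_dict.keys.foldl
    (fun flag key => if result_dict.getD key 0 > 1 then (0 : Int) else flag) flag

-- ===== PORT B =====
def groupSameGo (seen : PySem.Set (List Int)) : List (List Int) → Int
  | [] => 1
  | tul :: rest =>
      let p := PySem.List.slice tul none (some (-1))
      if p ∈ seen then 0
      else groupSameGo (PySem.Set.add seen p) rest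

def group_same_alt (tuple : List (List Int)) : Int :=
  groupSameGo PySem.Set.empty tuple

-- ===== PRECONDITION & SPEC =====
def Spec_group_same (tuple : List (List Int)) (out : Int) : Prop := out = group_same_alt tuple
instance (tuple : List (List Int)) (out : Int) : Decidable (Spec_group_same tuple out) := by unfold Spec_group_same; infer_instance

-- ===== CLAIM (what is proved, stated in full; the proofs are below) =====
def Claim_equal_group_same : Prop := ∀ (tuple : List (List Int)), Dom_group_same tuple → Spec_group_same tuple (group_same tuple)

-- ===== LEMMAS AND PROOFS =====

-- the prefix tul[:-1] both programs key on
def pvPrefix (tul : List Int) : List Int := PySem.List.slice tul none (some (-1))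

-- A's first loop is map pvPrefix
theorem foldl_append_map (l : List (List Int)) (acc : List (List Int)) :
    l.foldl (fun g tul => g ++ [PySem.List.slice tul none (some (-1))]) acc
      = acc ++ l.map pvPrefix := by
  induction l generalizing acc with
  | nil => simp
  | cons t ts ih => simp [List.foldl_cons, ih, pvPrefix]

-- A's second loop: flag ends 0 iff some key satisfies the test
theorem foldl_flag {α : Type} (p : α → Prop) [DecidablePred p] (l : List α) (init : Int) :
    l.foldl (fun fl k => if p k then (0 : Int) else fl) init
      = if ∃ k ∈ l, p k then 0 else init := by
  induction l generalizing init with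
  | nil => simp
  | cons x xs ih =>
    by_cases hx : p x
    · simp [List.foldl_cons, hx, ih]
    · simp [List.foldl_cons, hx, ih]

-- characterisation of A
theorem group_same_char (tuple : List (List Int)) :
    group_same tuple = if (tuple.map pvPrefix).Nodup then 1 else 0 := by
  unfold group_same
  dsimp only
  rw [foldl_append_map, List.nil_append]
  rw [foldl_flag (fun key => (PySem.Dict.counter (tuple.map pvPrefix)).getD key 0 > 1)]
  by_cases h : (tuple.map pvPrefix).Nodup
  · rw [if_pos h, if_neg]
    simp only [PySem.Dict.keys_counter, PySem.Dict.getD_counter, PySem.Set.mem_ofList,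
      not_exists]
    intro k ⟨hk, hgt⟩
    have := (List.nodup_iff_count_le_one.mp h) k
    omega
  · rw [if_neg h, if_pos]
    simp only [PySem.Dict.keys_counter, PySem.Dict.getD_counter, PySem.Set.mem_ofList]
    rcases (not_forall.mp (fun hall => h (List.nodup_iff_count_le_one.mpr hall))) with ⟨k, hk⟩
    refine ⟨k, ?_, by omega⟩
    have : 0 < (tuple.map pvPrefix).count k := by omega
    exact List.count_pos_iff.mp this

-- characterisation of B's loop
theorem groupSameGo_char (l : List (List Int)) :
    ∀ seen : PySem.Set (List Int),
      groupSameGo seen l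
        = if (l.map pvPrefix).Nodup ∧ ∀ p ∈ l.map pvPrefix, p ∉ seen then 1 else 0 := by
  induction l with
  | nil => intro seen; simp [groupSameGo]
  | cons t ts ih =>
    intro seen
    show (if pvPrefix t ∈ seen then (0 : Int)
          else groupSameGo (PySem.Set.add seen (pvPrefix t)) ts) = _
    by_cases hc : pvPrefix t ∈ seen
    · rw [if_pos hc, if_neg]
      rintro ⟨-, hall⟩
      exact hall (pvPrefix t) (by simp) hc
    · rw [if_neg hc, ih]
      refine if_congr ?_ rfl rfl
      simp only [List.map_cons, List.nodup_cons, List.mem_cons, PySem.Set.mem_add,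
        forall_eq_or_imp, not_or]
      constructor
      · rintro ⟨hnd, hall⟩
        exact ⟨⟨fun hm => (hall _ hm).2 rfl, hnd⟩, hc, fun a ha => (hall a ha).1⟩
      · rintro ⟨⟨hni, hnd⟩, -, hall⟩
        exact ⟨hnd, fun p hp => ⟨hall p hp, fun he => hni (he ▸ hp)⟩⟩

theorem group_same_alt_char (tuple : List (List Int)) :
    group_same_alt tuple = if (tuple.map pvPrefix).Nodup then 1 else 0 := by
  unfold group_same_alt
  rw [groupSameGo_char]
  refine if_congr ?_ rfl rfl
  simp [PySem.Set.empty]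

-- ===== VERDICT (by name: the statement is the Claim_ definition above) =====
theorem group_same_spec : Claim_equal_group_same := by
  intro tuple _
  show group_same tuple = group_same_alt tuple
  rw [group_same_char, group_same_alt_char]
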